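-- pv_equiv track=rewrite | github.com/nickredmond/advent-2019 | dec-07.py | get_instruction
-- ===== SOURCE A (Python) =====
-- PARAMS_QTY_BY_OPERATION = {
--     1: 3,
--     2: 3,
--     3: 1,
--     4: 1,
--     5: 2,
--     6: 2,
--     7: 3,
--     8: 3,
--     99: -1
-- }
--
-- def get_instruction(instructionCode):
--     instructionText = str(instructionCode)
--     index = len(instructionText) - 1
--     paramModesRemaining = 0
--     instruction = ''
--     while paramModesRemaining == 0:
--         instructionPart = instructionText[index] if index >= 0 else '0'
--         instruction = instructionPart + instruction
--         if (len(instruction) == 2):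
--             operation = int(instruction)
--             paramModesRemaining = PARAMS_QTY_BY_OPERATION[operation]
--         index = index - 1
--     while paramModesRemaining > 0:
--         paramMode = instructionText[index] if index >= 0 else '0'
--         instruction = paramMode + instruction
--         paramModesRemaining = paramModesRemaining - 1
--         index = index - 1
--     return instruction
-- ===== SOURCE B (Python) =====
-- PARAMS_QTY_BY_OPERATION = {
--     1: 3,
--     2: 3,
--     3: 1,
--     4: 1,
--     5: 2,
--     6: 2,
--     7: 3,
--     8: 3,
--     99: -1
-- }
--
-- def get_instruction(instructionCode):
--     text = str(instructionCode)
--     opcode = text[-2:].rjust(2, '0')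
--     params = PARAMS_QTY_BY_OPERATION[int(opcode)]
--     if params <= 0:
--         return opcode
--     return text[:-2][-params:].rjust(params, '0') + opcode
-- ===== Notes on version B (the rewrite author's own statement) =====
-- stated objective: simpler
-- what changed: A's two digit-by-digit while-loops over the decimal string are replaced by direct string slicing: the opcode is the '0'-padded last two characters and the param-mode window is a '0'-padded slice of the rest, with one dict lookup.
import Mathlib
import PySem

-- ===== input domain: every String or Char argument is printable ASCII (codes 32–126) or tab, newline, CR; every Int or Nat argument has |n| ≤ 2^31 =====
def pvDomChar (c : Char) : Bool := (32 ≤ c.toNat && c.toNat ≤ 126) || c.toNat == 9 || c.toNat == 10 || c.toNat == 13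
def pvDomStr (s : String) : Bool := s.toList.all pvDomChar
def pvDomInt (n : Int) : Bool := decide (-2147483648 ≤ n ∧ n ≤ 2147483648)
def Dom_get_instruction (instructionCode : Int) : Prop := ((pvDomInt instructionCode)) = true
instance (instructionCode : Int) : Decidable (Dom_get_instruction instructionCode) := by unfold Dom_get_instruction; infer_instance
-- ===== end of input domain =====

-- B replaces A's two digit-by-digit while-loops by two slices of the decimal string plus '0'-padding (objective: simpler).

-- ===== PORT A =====
def PARAMS_QTY_BY_OPERATION : PySem.Dict Int Int :=
  PySem.Dict.ofList [(1,3),(2,3),(3,1),(4,1),(5,2),(6,2),(7,3),(8,3),(99,-1)]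

-- first while loop of A; fuel = text.length + 2 (the loop exits on its second iteration whenever the
-- dict lookup succeeds; a failed lookup is Python's KeyError, excluded by Pre_, where we return junk)
def getInstrLoop1 : Nat → List Char → Int → List Char → List Char × Int × Int
  | 0, _, index, instruction => (instruction, 0, index)
  | fuel+1, text, index, instruction =>
    let instructionPart := if 0 ≤ index then (PySem.List.pyGet? text index).getD '0' else '0'
    let instruction := instructionPart :: instruction
    let index := index - 1
    if instruction.length = 2 then
      let operation := (PySem.Int.ofChars? instruction).getD 0   -- int() always succeeds on these chars
      let pm := (PySem.Dict.get? PARAMS_QTY_BY_OPERATION operation).getD 0  -- none = KeyError, outside Pre_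
      if pm = 0 then getInstrLoop1 fuel text index instruction
      else (instruction, pm, index)
    else getInstrLoop1 fuel text index instruction

-- second while loop of A; runs paramModesRemaining.toNat times
def getInstrLoop2 : Nat → List Char → Int → List Char → List Char
  | 0, _, _, instruction => instruction
  | n+1, text, index, instruction =>
    let paramMode := if 0 ≤ index then (PySem.List.pyGet? text index).getD '0' else '0'
    getInstrLoop2 n text (index - 1) (paramMode :: instruction)

def get_instruction (instructionCode : Int) : String :=
  let text := PySem.Int.toChars instructionCode
  let r := getInstrLoop1 (text.length + 2) text ((text.length : Int) - 1) []
  String.ofList (getInstrLoop2 r.2.1.toNat text r.2.2 r.1)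

-- ===== PORT B =====
-- s.rjust(w, '0') : left-pad with '0' to width w (exact: rjust never moves a sign)
def rjust0 (cs : List Char) (w : Nat) : List Char := List.replicate (w - cs.length) '0' ++ cs

def get_instruction_alt (instructionCode : Int) : String :=
  let text := PySem.Int.toChars instructionCode
  let opcode := rjust0 (PySem.List.slice text (some (-2)) none) 2
  let params := (PySem.Dict.get? PARAMS_QTY_BY_OPERATION
      ((PySem.Int.ofChars? opcode).getD 0)).getD 0   -- none = KeyError, outside Pre_
  if params ≤ 0 then String.ofList opcode
  else String.ofList (rjust0 (PySem.List.slice (PySem.List.slice text none (some (-2)))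
      (some (-params)) none) params.toNat ++ opcode)

-- ===== PRECONDITION & SPEC =====
-- the opcode of instructionCode: the int value of the last two characters of str(instructionCode)
-- (left-padded with '0'); Pre_ says it is a known operation — on any other code both A and B raise KeyError
def pvOpcodeOf (instructionCode : Int) : Int :=
  (PySem.Int.ofChars? (rjust0 (PySem.List.slice (PySem.Int.toChars instructionCode) (some (-2)) none) 2)).getD 0

def Pre_get_instruction (instructionCode : Int) : Prop :=
  (PySem.Dict.get? PARAMS_QTY_BY_OPERATION (pvOpcodeOf instructionCode)).isSome = true
instance (instructionCode : Int) : Decidable (Pre_get_instruction instructionCode) := by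
  unfold Pre_get_instruction; infer_instance

def pvWitness_get_instruction : Int := (1002)

def Spec_get_instruction (instructionCode : Int) (out : String) : Prop := out = get_instruction_alt instructionCode
instance (instructionCode : Int) (out : String) : Decidable (Spec_get_instruction instructionCode out) := by unfold Spec_get_instruction; infer_instance

-- ===== CLAIM (what is proved, stated in full; the proofs are below) =====
def Claim_equal_get_instruction : Prop := ∀ (instructionCode : Int), Dom_get_instruction instructionCode → Pre_get_instruction instructionCode → Spec_get_instruction instructionCode (get_instruction instructionCode)

-- ===== LEMMAS AND PROOFS =====

-- any value stored in the table is nonzero, so A's first loop exits right after a successful lookup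
theorem params_val_ne_zero (k v : Int) :
    PySem.Dict.get? PARAMS_QTY_BY_OPERATION k = some v → v ≠ 0 := by
  have h : PARAMS_QTY_BY_OPERATION
      = PySem.Dict.mk [(1,3),(2,3),(3,1),(4,1),(5,2),(6,2),(7,3),(8,3),(99,-1)] := by decide
  rw [h]
  simp only [PySem.Dict.get?_mk_cons]
  intro h
  split_ifs at h <;> simp_all [PySem.Dict.get?] <;> omega

-- the param-mode characters prepended by A's second loop, as a function of the count and start index
def pvGrab (t : List Char) : Nat → Int → List Char
  | 0, _ => []
  | n+1, index =>
    pvGrab t n (index - 1) ++ [if 0 ≤ index then (PySem.List.pyGet? t index).getD '0' else '0']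

theorem loop2_eq_grab (t : List Char) (n : Nat) (index : Int) (acc : List Char) :
    getInstrLoop2 n t index acc = pvGrab t n index ++ acc := by
  induction n generalizing index acc with
  | zero => simp [getInstrLoop2, pvGrab]
  | succ n ih => simp [getInstrLoop2, pvGrab, ih]

theorem grab_neg (t : List Char) (n : Nat) (index : Int) (h : index < 0) :
    pvGrab t n index = List.replicate n '0' := by
  induction n generalizing index with
  | zero => simp [pvGrab]
  | succ n ih =>
    rw [pvGrab, ih _ (by omega), if_neg (by omega), List.replicate_succ']

theorem grab_eq (t : List Char) (n m : Nat) (hm : m ≤ t.length) :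
    pvGrab t n ((m : Int) - 1) = List.replicate (n - m) '0' ++ (t.take m).drop (m - n) := by
  induction n generalizing m with
  | zero => simp [pvGrab, List.drop_eq_nil_of_le]
  | succ n ih =>
    match m with
    | 0 => rw [grab_neg t _ _ (by omega)]; simp
    | m'+1 =>
      rw [pvGrab]
      have h1 : ((m'+1 : Nat) : Int) - 1 - 1 = (m' : Int) - 1 := by push_cast; ring
      have h2 : ((m'+1 : Nat) : Int) - 1 = (m' : Nat) := by push_cast; ring
      rw [h1, h2, ih m' (by omega)]
      have hlt : m' < t.length := by omega
      have hget : (PySem.List.pyGet? t (m' : Int)).getD '0' = t[m'] := by simp [hlt]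
      rw [if_pos (by positivity), hget]
      have htake : t.take (m'+1) = t.take m' ++ [t[m']] := by
        rw [List.take_add_one]; simp [hlt]
      have he : m' + 1 - (n + 1) = m' - n := by omega
      have hr : n + 1 - (m' + 1) = n - m' := by omega
      rw [htake, he, hr, List.drop_append_of_le_length (by simp; omega), List.append_assoc]

-- symbolic evaluation of A's first loop on a text of length ≥ 2
theorem loop1_eval (v : List Char) (x y : Char) (pm : Int)
    (hpm : PySem.Dict.get? PARAMS_QTY_BY_OPERATION ((PySem.Int.ofChars? [x, y]).getD 0) = some pm) :
    getInstrLoop1 ((v ++ [x, y]).length + 2) (v ++ [x, y]) (((v ++ [x, y]).length : Int) - 1) []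
      = ([x, y], pm, (v.length : Int) - 1) := by
  have hne := params_val_ne_zero _ _ hpm
  have hl : (v ++ [x, y]).length = v.length + 2 := by simp
  rw [hl]
  have h1 : ((v.length + 2 : Nat) : Int) - 1 = ((v.length + 1 : Nat) : Int) := by push_cast; ring
  rw [show v.length + 2 + 2 = (v.length + 3) + 1 from rfl, getInstrLoop1, h1]
  simp only [PySem.List.pyGet?_natCast, Int.natCast_nonneg, if_pos]
  have hy : (v ++ [x, y])[v.length + 1]?.getD '0' = y := by simp
  rw [hy]
  simp only [List.length_cons, List.length_nil]
  rw [if_neg (by omega)]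
  have h2 : ((v.length + 1 : Nat) : Int) - 1 = ((v.length : Nat) : Int) := by push_cast; ring
  rw [show v.length + 3 = (v.length + 2) + 1 from rfl, getInstrLoop1, h2]
  simp only [PySem.List.pyGet?_natCast, Int.natCast_nonneg, if_pos]
  have hx : (v ++ [x, y])[v.length]?.getD '0' = x := by simp
  rw [hx]
  simp only [List.length_cons, List.length_nil, hpm, Option.getD_some]
  rw [if_neg hne]
  simp

-- symbolic evaluation of A's first loop on a one-character text
theorem loop1_eval_one (y : Char) (pm : Int)
    (hpm : PySem.Dict.get? PARAMS_QTY_BY_OPERATION ((PySem.Int.ofChars? ['0', y]).getD 0) = some pm) :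
    getInstrLoop1 ([y].length + 2) [y] (([y].length : Int) - 1) [] = (['0', y], pm, -2) := by
  have hne := params_val_ne_zero _ _ hpm
  rw [show [y].length + 2 = 2 + 1 from rfl, getInstrLoop1]
  rw [show (([y].length : Int) - 1) = 0 from rfl]
  rw [if_pos (le_refl 0), PySem.List.pyGet?_zero_cons]
  simp only [Option.getD_some, List.length_cons, List.length_nil]
  rw [if_neg (by omega)]
  rw [show (2:Nat) = 1 + 1 from rfl, getInstrLoop1]
  rw [if_neg (show ¬((0:Int) ≤ 0 - 1) from by omega)]
  rw [if_pos (show ('0' :: [y]).length = 2 from rfl)]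
  dsimp only
  rw [hpm]
  simp only [Option.getD_some]
  rw [if_neg hne]
  norm_num

theorem core_eq (t : List Char)
    (h : (PySem.Dict.get? PARAMS_QTY_BY_OPERATION
        ((PySem.Int.ofChars? (rjust0 (PySem.List.slice t (some (-2)) none) 2)).getD 0)).isSome = true) :
    (let r := getInstrLoop1 (t.length + 2) t ((t.length : Int) - 1) []
     String.ofList (getInstrLoop2 r.2.1.toNat t r.2.2 r.1)) =
    (let opcode := rjust0 (PySem.List.slice t (some (-2)) none) 2
     let params := (PySem.Dict.get? PARAMS_QTY_BY_OPERATION ((PySem.Int.ofChars? opcode).getD 0)).getD 0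
     if params ≤ 0 then String.ofList opcode
     else String.ofList (rjust0 (PySem.List.slice (PySem.List.slice t none (some (-2)))
        (some (-params)) none) params.toNat ++ opcode)) := by
  rcases ht : t.reverse with _ | ⟨y, rest⟩
  · -- t = []
    have ht0 : t = [] := by simpa using congrArg List.reverse ht
    rw [ht0] at h
    exact absurd h (by decide)
  rcases rest with _ | ⟨x, r⟩
  · -- t = [y]
    have ht1 : t = [y] := by simpa using congrArg List.reverse ht
    subst ht1
    have hsl : PySem.List.slice [y] (some (-2)) none = [y] := by
      rw [PySem.List.slice_from_neg_ofNat _ 2 (by omega)]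
      simp
    rw [hsl] at h ⊢
    have hop : rjust0 [y] 2 = ['0', y] := by simp [rjust0]
    rw [hop] at h ⊢
    rw [Option.isSome_iff_exists] at h
    obtain ⟨pm, hpm⟩ := h
    dsimp only
    rw [loop1_eval_one y pm hpm, hpm]
    simp only [Option.getD_some]
    rw [loop2_eq_grab, grab_neg _ _ _ (by omega)]
    by_cases hle : pm ≤ 0
    · rw [if_pos hle, Int.toNat_of_nonpos hle]
      simp
    · rw [if_neg hle]
      have hsl2 : PySem.List.slice [y] none (some (-2)) = ([] : List Char) := by
        rw [PySem.List.slice_to_neg_ofNat _ 2 (by omega)]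
        simp
      rw [hsl2]
      have hsl3 : PySem.List.slice ([] : List Char) (some (-pm)) none = [] := by
        simp [PySem.List.slice_some_none]
      rw [hsl3]
      simp [rjust0]
  · -- t = v ++ [x, y]
    have htv : t = r.reverse ++ [x, y] := by
      have := congrArg List.reverse ht
      simpa using this
    subst htv
    set v := r.reverse with hv
    have hsl : PySem.List.slice (v ++ [x, y]) (some (-2)) none = [x, y] := by
      rw [PySem.List.slice_from_neg_ofNat _ 2 (by omega)]
      simp
    rw [hsl] at h ⊢
    have hop : rjust0 [x, y] 2 = [x, y] := by simp [rjust0]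
    rw [hop] at h ⊢
    rw [Option.isSome_iff_exists] at h
    obtain ⟨pm, hpm⟩ := h
    dsimp only
    rw [loop1_eval v x y pm hpm, hpm]
    simp only [Option.getD_some]
    rw [loop2_eq_grab, grab_eq _ _ _ (by simp)]
    by_cases hle : pm ≤ 0
    · rw [if_pos hle, Int.toNat_of_nonpos hle]
      simp
    · rw [if_neg hle]
      have hsl2 : PySem.List.slice (v ++ [x, y]) none (some (-2)) = v := by
        rw [PySem.List.slice_to_neg_ofNat _ 2 (by omega)]
        simp
      rw [hsl2]
      have hpmn : -pm = -((pm.toNat : Nat) : Int) := by omega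
      have hsl3 : PySem.List.slice v (some (-pm)) none = v.drop (v.length - pm.toNat) := by
        rw [hpmn, PySem.List.slice_from_neg_natCast _ _ (by omega)]
      rw [hsl3]
      rw [List.take_left' rfl]
      simp only [rjust0, List.length_drop]
      have hcnt : pm.toNat - (v.length - (v.length - pm.toNat)) = pm.toNat - v.length := by omega
      rw [hcnt, List.append_assoc]

-- ===== VERDICT (by name: the statement is the Claim_ definition above) =====
theorem get_instruction_spec : Claim_equal_get_instruction := by
  intro c _ hpre
  unfold Spec_get_instruction get_instruction get_instruction_alt
  exact core_eq (PySem.Int.toChars c) hpre
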